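-- pv_equiv track=rewrite | github.com/akikuno/cstag | src/cstag/call.py | _split_md
-- ===== SOURCE A (Python) =====
-- def _split_md(md: str) -> list[tuple[str, int]]:
--     parsed_md = []
--     idx = 0
--     while idx < len(md):
--         if md[idx].isdigit():
--             start = idx
--             while idx < len(md) and md[idx].isdigit():
--                 idx += 1
--             parsed_md.append(("=", int(md[start:idx])))
--         elif md[idx] == "^":  # Deletion
--             start = idx
--             idx += 1
--             while idx < len(md) and not md[idx].isdigit():
--                 idx += 1
--             parsed_md.append((md[start:idx], idx - start - 1))
--         else:  # Mismatch
--             parsed_md.append((md[idx], 1))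
--             idx += 1
--     return parsed_md
-- ===== SOURCE B (Python) =====
-- def _split_md(md: str) -> list[tuple[str, int]]:
--     # One-pass character state machine: no index cursor, no inner scans, no slicing.
--     parsed = []
--     buf = ""
--     mode = ""  # "" = neutral, "d" = inside a digit run, "^" = inside a deletion
--     for ch in md:
--         if ch.isdigit():
--             if mode == "d":
--                 buf += ch
--             else:
--                 if mode == "^":
--                     parsed.append((buf, len(buf) - 1))
--                 buf, mode = ch, "d"
--         elif mode == "^":
--             buf += ch
--         elif ch == "^":
--             if mode == "d":
--                 parsed.append(("=", int(buf)))
--             buf, mode = ch, "^"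
--         else:
--             if mode == "d":
--                 parsed.append(("=", int(buf)))
--             buf, mode = "", ""
--             parsed.append((ch, 1))
--     if mode == "d":
--         parsed.append(("=", int(buf)))
--     elif mode == "^":
--         parsed.append((buf, len(buf) - 1))
--     return parsed
-- ===== Notes on version B (the rewrite author's own statement) =====
-- stated objective: alternative
-- what changed: Replaced A's index cursor with nested inner while-scans and slicing by a single one-pass character state machine (mode + token buffer) that emits tokens as runs end, with a final flush.
import Mathlib
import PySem

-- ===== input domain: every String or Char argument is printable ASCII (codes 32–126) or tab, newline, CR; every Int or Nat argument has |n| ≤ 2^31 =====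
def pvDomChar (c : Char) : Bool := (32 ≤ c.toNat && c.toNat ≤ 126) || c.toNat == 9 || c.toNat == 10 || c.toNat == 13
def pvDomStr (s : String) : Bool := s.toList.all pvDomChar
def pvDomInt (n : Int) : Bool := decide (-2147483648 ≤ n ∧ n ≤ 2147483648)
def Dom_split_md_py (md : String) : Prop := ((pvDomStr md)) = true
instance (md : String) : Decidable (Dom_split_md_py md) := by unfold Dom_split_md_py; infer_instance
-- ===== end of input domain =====

-- B replaces A's index cursor with inner scanning loops by a single one-pass
-- character state machine (fold with a token buffer): a different traversal structure with the same O(n) cost.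

-- ===== PORT A =====
-- inner loop: while idx < len(md) and md[idx].isdigit(): idx += 1   (returns the final idx)
def splitA_num (cs : List Char) (idx : Nat) : Nat :=
  if _h : idx < cs.length then
    if PySem.Chars.isdigit cs[idx] then splitA_num cs (idx + 1) else idx
  else idx
termination_by cs.length - idx

-- inner loop: idx += 1; while idx < len(md) and not md[idx].isdigit(): idx += 1
def splitA_del (cs : List Char) (idx : Nat) : Nat :=
  if _h : idx < cs.length then
    if PySem.Chars.isdigit cs[idx] then idx else splitA_del cs (idx + 1)
  else idx
termination_by cs.length - idx

-- the ports' termination cites these two bounds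
theorem le_splitA_num (cs : List Char) (idx : Nat) : idx ≤ splitA_num cs idx := by
  fun_induction splitA_num <;> omega

theorem le_splitA_del (cs : List Char) (idx : Nat) : idx ≤ splitA_del cs idx := by
  fun_induction splitA_del <;> omega

-- outer while loop of A; acc is parsed_md, idx the cursor
def splitA_go (cs : List Char) (idx : Nat) (acc : List (String × Int)) : List (String × Int) :=
  if h : idx < cs.length then
    if hd : PySem.Chars.isdigit cs[idx] then
      let j := splitA_num cs (idx + 1)   -- the loop body runs once (cs[idx] is a digit), then re-tests
      splitA_go cs j
        (acc ++ [("=", (PySem.Int.ofChars? (PySem.List.slice cs (some (idx : Int)) (some (j : Int)))).getD 0)])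
    else if cs[idx] = '^' then
      let j := splitA_del cs (idx + 1)
      splitA_go cs j
        (acc ++ [(String.ofList (PySem.List.slice cs (some (idx : Int)) (some (j : Int))), (j : Int) - (idx : Int) - 1)])
    else
      splitA_go cs (idx + 1) (acc ++ [(String.ofList [cs[idx]], 1)])
  else acc
termination_by cs.length - idx
decreasing_by
  · have := le_splitA_num cs (idx + 1); omega
  · have := le_splitA_del cs (idx + 1); omega
  · omega

def split_md_py (md : String) : List (String × Int) := splitA_go md.toList 0 []

-- ===== PORT B =====
inductive BMode where
  | non | dig | del
deriving DecidableEq, Repr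

-- int(buf); in B buf is always a nonempty digit run at this point, so ofChars? is some
def bInt (buf : List Char) : Int := (PySem.Int.ofChars? buf).getD 0

-- one step of B's for-loop: state = (parsed, buf, mode)
def bStep (st : List (String × Int) × List Char × BMode) (ch : Char) :
    List (String × Int) × List Char × BMode :=
  match st with
  | (parsed, buf, mode) =>
    if PySem.Chars.isdigit ch then
      if mode = BMode.dig then (parsed, buf ++ [ch], mode)
      else
        ((if mode = BMode.del then parsed ++ [(String.ofList buf, (buf.length : Int) - 1)] else parsed),
         [ch], BMode.dig)
    else if mode = BMode.del then (parsed, buf ++ [ch], mode)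
    else if ch = '^' then
      ((if mode = BMode.dig then parsed ++ [("=", bInt buf)] else parsed), [ch], BMode.del)
    else
      ((if mode = BMode.dig then parsed ++ [("=", bInt buf)] else parsed) ++ [(String.ofList [ch], 1)],
       [], BMode.non)

-- B's trailing flush (the final if/elif after the loop)
def bFin (st : List (String × Int) × List Char × BMode) : List (String × Int) :=
  match st.2.2 with
  | BMode.dig => st.1 ++ [("=", bInt st.2.1)]
  | BMode.del => st.1 ++ [(String.ofList st.2.1, (st.2.1.length : Int) - 1)]
  | BMode.non => st.1

def split_md_py_alt (md : String) : List (String × Int) :=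
  bFin (md.toList.foldl bStep ([], [], BMode.non))

-- ===== PRECONDITION & SPEC =====
def Spec_split_md_py (md : String) (out : List (String × Int)) : Prop := out = split_md_py_alt md
instance (md : String) (out : List (String × Int)) : Decidable (Spec_split_md_py md out) := by unfold Spec_split_md_py; infer_instance

-- ===== CLAIM (what is proved, stated in full; the proofs are below) =====
def Claim_equal_split_md_py : Prop := ∀ (md : String), Dom_split_md_py md → Spec_split_md_py md (split_md_py md)

-- ===== LEMMAS AND PROOFS =====

-- common reference tokenisation both ports are reduced to
def tok : List Char → List (String × Int)
  | [] => []
  | c :: cs =>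
    if PySem.Chars.isdigit c then
      ("=", bInt (c :: cs.takeWhile PySem.Chars.isdigit)) :: tok (cs.dropWhile PySem.Chars.isdigit)
    else if c = '^' then
      (String.ofList ('^' :: cs.takeWhile (fun x => !PySem.Chars.isdigit x)),
        ((cs.takeWhile (fun x => !PySem.Chars.isdigit x)).length : Int)) ::
        tok (cs.dropWhile (fun x => !PySem.Chars.isdigit x))
    else (String.ofList [c], 1) :: tok cs
termination_by cs => cs.length
decreasing_by
  · exact Nat.lt_succ_of_le (List.length_dropWhile_le _ _)
  · exact Nat.lt_succ_of_le (List.length_dropWhile_le _ _)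
  · exact Nat.lt_succ_self _

theorem take_length_takeWhile {α : Type} (p : α → Bool) (l : List α) :
    l.take (l.takeWhile p).length = l.takeWhile p := by
  induction l with
  | nil => rfl
  | cons a l ih => by_cases h : p a <;> simp [h, ih]

theorem drop_length_takeWhile {α : Type} (p : α → Bool) (l : List α) :
    l.drop (l.takeWhile p).length = l.dropWhile p := by
  induction l with
  | nil => rfl
  | cons a l ih => by_cases h : p a <;> simp [h, ih]

theorem splitA_num_eq (cs : List Char) (idx : Nat) :
    splitA_num cs idx = idx + ((cs.drop idx).takeWhile PySem.Chars.isdigit).length := by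
  fun_induction splitA_num with
  | case1 idx h hd ih =>
    rw [List.drop_eq_getElem_cons h, List.takeWhile_cons_of_pos hd]
    simp [ih]; omega
  | case2 idx h hd =>
    rw [List.drop_eq_getElem_cons h, List.takeWhile_cons_of_neg (by simpa using hd)]
    simp
  | case3 idx h =>
    rw [List.drop_eq_nil_iff.mpr (by omega)]; simp

theorem splitA_del_eq (cs : List Char) (idx : Nat) :
    splitA_del cs idx = idx + ((cs.drop idx).takeWhile (fun x => !PySem.Chars.isdigit x)).length := by
  fun_induction splitA_del with
  | case1 idx h hd =>
    rw [List.drop_eq_getElem_cons h, List.takeWhile_cons_of_neg (by simpa using hd)]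
    simp
  | case2 idx h hd ih =>
    rw [List.drop_eq_getElem_cons h, List.takeWhile_cons_of_pos (by simpa using hd)]
    simp [ih]; omega
  | case3 idx h =>
    rw [List.drop_eq_nil_iff.mpr (by omega)]; simp

theorem splitA_go_eq (cs : List Char) (idx : Nat) (acc : List (String × Int)) :
    splitA_go cs idx acc = acc ++ tok (cs.drop idx) := by
  fun_induction splitA_go with
  | case1 idx acc h hd j ih =>
    have hjd : j = idx + 1 + ((cs.drop (idx + 1)).takeWhile PySem.Chars.isdigit).length :=
      splitA_num_eq cs (idx + 1)
    have hdrop : cs.drop idx = cs[idx] :: cs.drop (idx + 1) := List.drop_eq_getElem_cons h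
    have hslice : PySem.List.slice cs (some (idx : Int)) (some (j : Int))
        = cs[idx] :: (cs.drop (idx + 1)).takeWhile PySem.Chars.isdigit := by
      rw [PySem.List.slice_natCast, hdrop, hjd]
      have h1 : idx + 1 + ((cs.drop (idx + 1)).takeWhile PySem.Chars.isdigit).length - idx
          = ((cs.drop (idx + 1)).takeWhile PySem.Chars.isdigit).length + 1 := by omega
      rw [h1, List.take_succ_cons, take_length_takeWhile]
    have hdropj : cs.drop j = (cs.drop (idx + 1)).dropWhile PySem.Chars.isdigit := by
      rw [hjd, ← drop_length_takeWhile PySem.Chars.isdigit (cs.drop (idx + 1)), List.drop_drop]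
    rw [ih, hslice, hdropj, hdrop, tok]
    simp [hd, bInt]
  | case2 idx acc h hd hc j ih =>
    have hjd : j = idx + 1 + ((cs.drop (idx + 1)).takeWhile (fun x => !PySem.Chars.isdigit x)).length :=
      splitA_del_eq cs (idx + 1)
    have hdrop : cs.drop idx = cs[idx] :: cs.drop (idx + 1) := List.drop_eq_getElem_cons h
    have hslice : PySem.List.slice cs (some (idx : Int)) (some (j : Int))
        = cs[idx] :: (cs.drop (idx + 1)).takeWhile (fun x => !PySem.Chars.isdigit x) := by
      rw [PySem.List.slice_natCast, hdrop, hjd]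
      have h1 : idx + 1 + ((cs.drop (idx + 1)).takeWhile (fun x => !PySem.Chars.isdigit x)).length - idx
          = ((cs.drop (idx + 1)).takeWhile (fun x => !PySem.Chars.isdigit x)).length + 1 := by omega
      rw [h1, List.take_succ_cons, take_length_takeWhile]
    have hdropj : cs.drop j = (cs.drop (idx + 1)).dropWhile (fun x => !PySem.Chars.isdigit x) := by
      rw [hjd, ← drop_length_takeWhile (fun x => !PySem.Chars.isdigit x) (cs.drop (idx + 1)), List.drop_drop]
    have hval : (j : Int) - (idx : Int) - 1
        = (((cs.drop (idx + 1)).takeWhile (fun x => !PySem.Chars.isdigit x)).length : Int) := by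
      rw [hjd]; push_cast; ring
    rw [ih, hslice, hval, hdrop, tok, if_neg (by simp [hd]), if_pos hc, hc, hdropj]
    simp
  | case3 idx acc h hd hc ih =>
    have hdrop : cs.drop idx = cs[idx] :: cs.drop (idx + 1) := List.drop_eq_getElem_cons h
    rw [ih, hdrop, tok]
    simp [hd, hc]
  | case4 idx acc h =>
    rw [List.drop_eq_nil_iff.mpr (by omega)]; simp [tok]

theorem bFoldl_eq (cs : List Char) :
    (∀ p, bFin (cs.foldl bStep (p, [], BMode.non)) = p ++ tok cs) ∧
    (∀ p buf, bFin (cs.foldl bStep (p, buf, BMode.dig)) =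
        p ++ ("=", bInt (buf ++ cs.takeWhile PySem.Chars.isdigit)) ::
          tok (cs.dropWhile PySem.Chars.isdigit)) ∧
    (∀ p buf, bFin (cs.foldl bStep (p, buf, BMode.del)) =
        p ++ (String.ofList (buf ++ cs.takeWhile (fun x => !PySem.Chars.isdigit x)),
              ((buf ++ cs.takeWhile (fun x => !PySem.Chars.isdigit x)).length : Int) - 1) ::
          tok (cs.dropWhile (fun x => !PySem.Chars.isdigit x))) := by
  induction cs with
  | nil => exact ⟨fun p => by simp [bFin, tok], fun p buf => by simp [bFin, tok],
      fun p buf => by simp [bFin, tok]⟩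
  | cons c cs ih =>
    obtain ⟨ihn, ihd, ihx⟩ := ih
    refine ⟨?_, ?_, ?_⟩
    · intro p
      by_cases hc : PySem.Chars.isdigit c
      · rw [List.foldl_cons]
        have hstep : bStep ((p : List (String × Int)), ([] : List Char), BMode.non) c = (p, [c], BMode.dig) := by
          simp [bStep, hc]
        rw [hstep, ihd]
        simp [tok, hc]
      · by_cases hk : c = '^'
        · subst hk
          rw [List.foldl_cons]
          have hstep : bStep ((p : List (String × Int)), ([] : List Char), BMode.non) '^' = (p, ['^'], BMode.del) := by
            simp [bStep, hc]
          rw [hstep, ihx]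
          simp [tok, hc]
        · rw [List.foldl_cons]
          have hstep : bStep ((p : List (String × Int)), ([] : List Char), BMode.non) c = (p ++ [(String.ofList [c], 1)], [], BMode.non) := by
            simp [bStep, hc, hk]
          rw [hstep, ihn]
          simp [tok, hc, hk]
    · intro p buf
      by_cases hc : PySem.Chars.isdigit c
      · rw [List.foldl_cons]
        have hstep : bStep ((p : List (String × Int)), buf, BMode.dig) c = (p, buf ++ [c], BMode.dig) := by
          simp [bStep, hc]
        rw [hstep, ihd]
        simp [hc]
      · by_cases hk : c = '^'
        · subst hk
          rw [List.foldl_cons]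
          have hstep : bStep ((p : List (String × Int)), buf, BMode.dig) '^' = (p ++ [("=", bInt buf)], ['^'], BMode.del) := by
            simp [bStep, hc]
          rw [hstep, ihx]
          simp [tok, hc]
        · rw [List.foldl_cons]
          have hstep : bStep ((p : List (String × Int)), buf, BMode.dig) c = (p ++ [("=", bInt buf)] ++ [(String.ofList [c], 1)], [], BMode.non) := by
            simp [bStep, hc, hk]
          rw [hstep, ihn]
          simp [tok, hc, hk]
    · intro p buf
      by_cases hc : PySem.Chars.isdigit c
      · rw [List.foldl_cons]
        have hstep : bStep ((p : List (String × Int)), buf, BMode.del) c = (p ++ [(String.ofList buf, (buf.length : Int) - 1)], [c], BMode.dig) := by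
          simp [bStep, hc]
        rw [hstep, ihd]
        simp [tok, hc]
      · rw [List.foldl_cons]
        have hstep : bStep ((p : List (String × Int)), buf, BMode.del) c = (p, buf ++ [c], BMode.del) := by
          simp [bStep, hc]
        rw [hstep, ihx]
        simp [hc]

-- ===== VERDICT (by name: the statement is the Claim_ definition above) =====
theorem split_md_py_spec : Claim_equal_split_md_py := by
  intro md _
  unfold Spec_split_md_py split_md_py split_md_py_alt
  rw [splitA_go_eq, (bFoldl_eq md.toList).1]
  simp
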